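-- pv_equiv track=rewrite | github.com/tmulherin/thinkpy | Distance/main.py | util_isNumber
-- ===== SOURCE A (Python) =====
-- def util_isNumber(string):
--
--     string = str(string) #-> Just in case...
--     decimal_counter = 0
--
--     for char in string:
--         if char == ".":
--             decimal_counter += 1
--             if decimal_counter > 1:
--                 return 0
--         elif char not in ("0", "1", "2", "3", "4", "5", "6", "7", "8", "9"):
--             return 0
--
--     return 1
-- ===== SOURCE B (Python) =====
-- def util_isNumber(string):
--     s = str(string)
--     if s.count('.') > 1:
--         return 0
--     return 1 if all(c in "0123456789" for c in s.replace('.', '')) else 0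
-- ===== Notes on version B (the rewrite author's own statement) =====
-- stated objective: idiomatic
-- what changed: Replaces the stateful per-character loop with counter and early returns by a declarative check: count the dots once, then verify all remaining characters are digits via all().
import Mathlib
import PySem

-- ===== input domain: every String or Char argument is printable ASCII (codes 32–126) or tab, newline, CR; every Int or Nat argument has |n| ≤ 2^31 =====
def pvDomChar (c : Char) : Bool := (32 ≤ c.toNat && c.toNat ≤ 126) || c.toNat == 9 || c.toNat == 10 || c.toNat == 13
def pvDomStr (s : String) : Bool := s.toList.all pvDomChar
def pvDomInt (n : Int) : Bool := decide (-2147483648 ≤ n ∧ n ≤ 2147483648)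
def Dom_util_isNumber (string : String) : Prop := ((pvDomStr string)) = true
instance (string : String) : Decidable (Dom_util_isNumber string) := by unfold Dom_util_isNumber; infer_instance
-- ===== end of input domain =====

-- B replaces A's stateful loop (decimal counter + early returns) with a declarative
-- check: count the dots once, then check every non-dot character is a digit.

-- ===== PORT A =====
-- the for-loop over the characters, with the running decimal_counter
def pvALoop : List Char → Int → Int
  | [], _ => 1
  | c :: rest, dc =>
    if c = '.' then
      (if dc + 1 > 1 then 0 else pvALoop rest (dc + 1))
    else if c ∈ ['0','1','2','3','4','5','6','7','8','9'] then
      pvALoop rest dc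
    else
      0

def util_isNumber (string : String) : Int := pvALoop string.toList 0

-- ===== PORT B =====
def util_isNumber_alt (string : String) : Int :=
  let l := string.toList
  if l.count '.' > 1 then 0
  else if (l.filter (fun c => c ≠ '.')).all (fun c => c ∈ ['0','1','2','3','4','5','6','7','8','9']) then 1
  else 0

-- ===== PRECONDITION & SPEC =====
def Spec_util_isNumber (string : String) (out : Int) : Prop := out = util_isNumber_alt string
instance (string : String) (out : Int) : Decidable (Spec_util_isNumber string out) := by unfold Spec_util_isNumber; infer_instance

-- ===== CLAIM (what is proved, stated in full; the proofs are below) =====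
def Claim_equal_util_isNumber : Prop := ∀ (string : String), Dom_util_isNumber string → Spec_util_isNumber string (util_isNumber string)

-- ===== LEMMAS AND PROOFS =====
theorem pvALoop_char :
    ∀ (l : List Char) (dc : Int), dc ≤ 1 →
      pvALoop l dc =
        if (l.count '.' : Int) + dc > 1 then 0
        else if (l.filter (fun c => c ≠ '.')).all (fun c => c ∈ ['0','1','2','3','4','5','6','7','8','9']) then 1
        else 0 := by
  intro l
  induction l with
  | nil => intro dc hdc; simp [pvALoop]; omega
  | cons c rest ih =>
    intro dc hdc
    by_cases hdot : c = '.'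
    · subst hdot
      simp only [pvALoop, if_pos rfl, List.count_cons, List.filter_cons]
      by_cases h1 : dc + 1 > 1
      · have hcnt : ((rest.count '.' + 1 : Nat) : Int) + dc > 1 := by
          push_cast; omega
        simp only [if_pos h1, beq_self_eq_true, if_pos]
        norm_num
        push_cast
        omega
      · rw [if_neg h1, ih (dc + 1) (by omega)]
        have hiff : ((rest.count '.' : Int) + (dc + 1) > 1) ↔ (((rest.count '.' + 1 : Nat) : Int) + dc > 1) := by
          push_cast; omega
        simp only [beq_self_eq_true, if_true, hiff]
        rw [if_neg (by simp : ¬ (decide (('.':Char) ≠ '.') = true))]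
    · by_cases hdig : c ∈ ['0','1','2','3','4','5','6','7','8','9']
      · simp only [pvALoop, if_neg hdot, if_pos hdig, List.count_cons, List.filter_cons]
        rw [ih dc hdc]
        have hd : c = '0' ∨ c = '1' ∨ c = '2' ∨ c = '3' ∨ c = '4' ∨ c = '5' ∨ c = '6' ∨ c = '7' ∨ c = '8' ∨ c = '9' := by
          simpa using hdig
        simp [hdot]
        split_ifs <;> tauto
      · simp only [pvALoop, if_neg hdot, if_neg hdig, List.count_cons, List.filter_cons]
        have hd : ¬ (c = '0' ∨ c = '1' ∨ c = '2' ∨ c = '3' ∨ c = '4' ∨ c = '5' ∨ c = '6' ∨ c = '7' ∨ c = '8' ∨ c = '9') := by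
          simpa using hdig
        simp [hdot]
        intro x
        tauto

-- ===== VERDICT (by name: the statement is the Claim_ definition above) =====
theorem util_isNumber_spec : Claim_equal_util_isNumber := by
  intro s _
  unfold Spec_util_isNumber util_isNumber util_isNumber_alt
  rw [pvALoop_char _ _ (by omega)]
  simp only [add_zero]
  by_cases h : (s.toList.count '.' : Int) > 1
  · have h' : s.toList.count '.' > 1 := by exact_mod_cast h
    simp [h, h']
  · have h' : ¬ s.toList.count '.' > 1 := by
      intro hc; exact h (by exact_mod_cast hc)
    simp [h, h']
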